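-- pv_equiv track=rewrite | github.com/PsychoLeo/informatique | competitions/code-jam/Round_1C/roaringYears.py | isRugissant
-- ===== SOURCE A (Python) =====
-- def isRugissant(year):
--     year = str(year)
--     for k in range(1,len(year)//2+1):
--         number = int(year[:k])
--
--         reste = year[k:]
--         number+=1
--
--         while True:
--             if reste == "":
--                 return True
--
--             sizeNumber = len(str(number))
--             if sizeNumber > len(reste):
--                 break
--             if str(number) == reste[:sizeNumber]:
--                 reste = reste[sizeNumber:]
--                 number+=1
--             else:
--                 break
--     return False
-- ===== SOURCE B (Python) =====
-- def isRugissant(year):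
--     s = str(year)
--     n = len(s)
--     half = n // 2
--     for k in range(1, n):  # k = length of the final number's decimal block
--         t = s[n - k:]
--         last = 0
--         for ch in t:  # value of the candidate final block, digit by digit
--             last = last * 10 + (ord(ch) - 48)
--         if str(last) != t:  # not a canonical decimal block (leading zero / non-digit)
--             continue
--         i, cur = n - k, last
--         while i > 0:  # peel preceding consecutive numbers off the back
--             if i <= half and int(s[:i]) == cur - 1:
--                 return True
--             p = str(cur - 1)
--             if s[:i].endswith(p):
--                 i -= len(p)
--                 cur -= 1
--             else:
--                 break
--     return False
-- ===== Notes on version B (the rewrite author's own statement) =====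
-- stated objective: alternative
-- what changed: A scans left-to-right: for every prefix length it parses the leading number and greedily consumes the rest with successive increments; B works right-to-left: it enumerates the length of the FINAL number's canonical decimal block, reconstructs that value digit by digit, then peels successively decremented numbers off the back, succeeding when the unpeeled head parses to the predecessor.
import Mathlib
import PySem

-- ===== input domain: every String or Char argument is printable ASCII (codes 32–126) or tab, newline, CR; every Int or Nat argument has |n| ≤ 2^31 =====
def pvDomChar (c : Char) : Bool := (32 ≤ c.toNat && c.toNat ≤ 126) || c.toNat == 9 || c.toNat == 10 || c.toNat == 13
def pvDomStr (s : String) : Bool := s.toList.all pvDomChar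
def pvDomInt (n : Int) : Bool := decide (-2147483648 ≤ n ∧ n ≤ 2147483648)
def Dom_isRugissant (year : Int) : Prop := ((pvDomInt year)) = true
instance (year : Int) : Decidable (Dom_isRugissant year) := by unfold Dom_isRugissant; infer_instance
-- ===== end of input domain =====

-- B replaces A's left-to-right scan (parse each prefix, consume the rest with increasing
-- numbers) by a right-to-left one: enumerate the final number's canonical decimal block,
-- rebuild its value digit by digit, peel decremented numbers off the back, and succeed when
-- the unpeeled head parses to the predecessor (objective: alternative).

-- str(n) is never empty (needed for termination of the loops in both ports)
theorem pvToDigitsCore_len (b f n : Nat) (acc : List Char) (hf : 0 < f) :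
    acc.length < (Nat.toDigitsCore b f n acc).length := by
  induction f generalizing n acc with
  | zero => omega
  | succ f ih =>
    simp only [Nat.toDigitsCore]
    split
    · simp
    · rcases Nat.eq_zero_or_pos f with h | h
      · subst h; simp [Nat.toDigitsCore]
      · have := ih (n / b) (Nat.digitChar (n % b) :: acc) h
        simp at this ⊢; omega

theorem pvToChars_len_pos (n : Int) : 0 < (PySem.Int.toChars n).length := by
  unfold PySem.Int.toChars
  split
  · simp
  · simpa using pvToDigitsCore_len 10 (n.toNat + 1) n.toNat [] (by omega)

-- ===== PORT A =====
-- inner 'while True' loop of A; entered with number already incremented once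
def pvAInner (number : Int) (reste : List Char) : Bool :=
  if reste = [] then true
  else if (PySem.Int.toChars number).length > reste.length then false
  else if PySem.Int.toChars number = reste.take (PySem.Int.toChars number).length then
    pvAInner (number + 1) (reste.drop (PySem.Int.toChars number).length)
  else false
termination_by reste.length
decreasing_by
  have h1 := pvToChars_len_pos number
  simp [List.length_pos_iff]
  exact ⟨‹¬reste = []›, fun h => by rw [h] at h1; simp at h1⟩

def isRugissant (year : Int) : Bool :=
  let s := PySem.Int.toChars year
  (PySem.List.pyRange 1 (PySem.Int.floordiv (s.length : Int) 2 + 1) 1).any fun k =>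
    match PySem.Int.ofChars? (s.take k.toNat) with
    | none => false   -- Python raises ValueError here (only when year < 0, outside Pre_)
    | some number => pvAInner (number + 1) (s.drop k.toNat)

-- ===== PORT B =====
-- 'last = last*10 + (ord(ch) - 48)' digit loop of B
def pvDigitVal (t : List Char) : Int :=
  t.foldl (fun a c => a * 10 + ((c.toNat : Int) - 48)) 0

-- B's 'while i > 0' loop: peel str(cur-1), str(cur-2), … off the back of s[:i]
def pvBPeel (s : List Char) (half : Nat) (i : Nat) (cur : Int) : Bool :=
  if 0 < i then
    if i ≤ half ∧ PySem.Int.ofChars? (s.take i) = some (cur - 1) then true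
      -- (Python evaluates int(s[:i]) only when i ≤ half; it raises only for year < 0, outside Pre_)
    else if PySem.Chars.endswith (s.take i) (PySem.Int.toChars (cur - 1)) then
      pvBPeel s half (i - (PySem.Int.toChars (cur - 1)).length) (cur - 1)
    else false
  else false
termination_by i
decreasing_by
  have h1 := pvToChars_len_pos (cur - 1)
  omega

def isRugissant_alt (year : Int) : Bool :=
  let s := PySem.Int.toChars year
  let n := s.length
  (PySem.List.pyRange 1 (n : Int) 1).any fun k =>
    let t := s.drop (n - k.toNat)
    let last := pvDigitVal t
    if PySem.Int.toChars last = t then pvBPeel s (n / 2) (n - k.toNat) last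
    else false

-- ===== PRECONDITION & SPEC =====
-- A raises ValueError on every negative year: str(year) starts with '-' and int('-') fails at k = 1.
def Pre_isRugissant (year : Int) : Prop := 0 ≤ year
instance (year : Int) : Decidable (Pre_isRugissant year) := by unfold Pre_isRugissant; infer_instance
def pvWitness_isRugissant : Int := (1213)

def Spec_isRugissant (year : Int) (out : Bool) : Prop := out = isRugissant_alt year
instance (year : Int) (out : Bool) : Decidable (Spec_isRugissant year out) := by unfold Spec_isRugissant; infer_instance

-- ===== CLAIM (what is proved, stated in full; the proofs are below) =====
def Claim_equal_isRugissant : Prop := ∀ (year : Int), Dom_isRugissant year → Pre_isRugissant year → Spec_isRugissant year (isRugissant year)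

-- ===== LEMMAS AND PROOFS =====

-- the concatenation str(nb) + str(nb+1) + … (m blocks)
def pvChain (nb : Int) : Nat → List Char
  | 0 => []
  | m + 1 => PySem.Int.toChars nb ++ pvChain (nb + 1) m

theorem pvChain_split (a : Nat) (nb : Int) (b : Nat) :
    pvChain nb (a + b) = pvChain nb a ++ pvChain (nb + a) b := by
  induction a generalizing nb with
  | zero => simp [pvChain]
  | succ a ih =>
    rw [show a + 1 + b = (a + b) + 1 from by omega]
    show PySem.Int.toChars nb ++ pvChain (nb + 1) (a + b)
        = (PySem.Int.toChars nb ++ pvChain (nb + 1) a) ++ pvChain (nb + ((a : Nat) + 1 : Nat)) b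
    rw [ih (nb + 1), List.append_assoc,
      show nb + (((a : Nat) + 1 : Nat) : Int) = nb + 1 + (a : Int) from by push_cast; ring]

theorem pvChain_one (nb : Int) : pvChain nb 1 = PySem.Int.toChars nb := by
  simp [pvChain]

theorem pvChain_snoc (nb : Int) (m : Nat) :
    pvChain nb (m + 1) = pvChain nb m ++ PySem.Int.toChars (nb + m) := by
  rw [pvChain_split m nb 1, pvChain_one]

-- the common specification: s splits as prefix (of length ≤ len/2, parsing to v)
-- followed by the concatenation str(v+1) … str(v+m), m ≥ 1
def pvRoar (s : List Char) : Prop :=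
  ∃ k v m, 1 ≤ k ∧ k ≤ s.length / 2 ∧ 1 ≤ m ∧
    PySem.Int.ofChars? (s.take k) = some v ∧ s.drop k = pvChain (v + 1) m

-- ===== A-side lemmas =====

theorem pvAInner_sound (nb : Int) (reste : List Char) (h : pvAInner nb reste = true) :
    ∃ m, reste = pvChain nb m := by
  rw [pvAInner] at h
  by_cases h0 : reste = []
  · exact ⟨0, by simp [h0, pvChain]⟩
  · rw [if_neg h0] at h
    by_cases h1 : (PySem.Int.toChars nb).length > reste.length
    · simp [h1] at h
    · rw [if_neg h1] at h
      by_cases h2 : PySem.Int.toChars nb = reste.take (PySem.Int.toChars nb).length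
      · rw [if_pos h2] at h
        obtain ⟨m, hm⟩ := pvAInner_sound (nb + 1) (reste.drop (PySem.Int.toChars nb).length) h
        refine ⟨m + 1, ?_⟩
        show reste = PySem.Int.toChars nb ++ pvChain (nb + 1) m
        rw [← hm]
        conv_lhs => rw [← List.take_append_drop (PySem.Int.toChars nb).length reste]
        exact congrArg (fun x => x ++ List.drop (PySem.Int.toChars nb).length reste) h2.symm
      · simp [h2] at h
termination_by reste.length
decreasing_by
  have h1 := pvToChars_len_pos nb
  have h2 : 0 < reste.length := List.length_pos_of_ne_nil h0
  simp only [List.length_drop]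
  omega

theorem pvAInner_complete (m : Nat) (nb : Int) : pvAInner nb (pvChain nb m) = true := by
  induction m generalizing nb with
  | zero => rw [pvAInner]; simp [pvChain]
  | succ m ih =>
    have hdef : pvChain nb (m + 1) = PySem.Int.toChars nb ++ pvChain (nb + 1) m := rfl
    rw [pvAInner, hdef]
    have hne : PySem.Int.toChars nb ++ pvChain (nb + 1) m ≠ [] := by
      have := pvToChars_len_pos nb
      intro h; rw [List.append_eq_nil_iff] at h
      rw [h.1] at this; simp at this
    rw [if_neg hne]
    have hlen : ¬ (PySem.Int.toChars nb).length
        > (PySem.Int.toChars nb ++ pvChain (nb + 1) m).length := by simp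
    rw [if_neg hlen, List.take_left, if_pos rfl, List.drop_left]
    exact ih (nb + 1)

theorem pvA_iff (year : Int) :
    isRugissant year = true ↔ pvRoar (PySem.Int.toChars year) := by
  unfold isRugissant
  rw [List.any_eq_true]
  have hfd : PySem.Int.floordiv ((PySem.Int.toChars year).length : Int) 2
      = (((PySem.Int.toChars year).length / 2 : Nat) : Int) := by
    rw [show (2:Int) = ((2:Nat):Int) by norm_num]
    exact PySem.Int.floordiv_natCast _ 2
  constructor
  · rintro ⟨k, hk, hbody⟩
    rw [PySem.List.mem_pyRange_one, hfd] at hk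
    set s := PySem.Int.toChars year with hs
    cases hp : PySem.Int.ofChars? (s.take k.toNat) with
    | none => rw [hp] at hbody; simp at hbody
    | some v =>
      rw [hp] at hbody
      obtain ⟨m, hm⟩ := pvAInner_sound (v + 1) (s.drop k.toNat) hbody
      have hn : 0 < s.length := pvToChars_len_pos year
      have hk1 : 1 ≤ k.toNat := by omega
      have hk2 : k.toNat ≤ s.length / 2 := by omega
      have hm1 : 1 ≤ m := by
        rcases Nat.eq_zero_or_pos m with h | h
        · exfalso
          rw [h] at hm
          simp [pvChain] at hm
          omega
        · exact h
      exact ⟨k.toNat, v, m, hk1, hk2, hm1, hp, hm⟩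
  · rintro ⟨k, v, m, hk1, hk2, hm1, hp, hd⟩
    refine ⟨(k : Int), ?_, ?_⟩
    · rw [PySem.List.mem_pyRange_one, hfd]
      constructor <;> [exact_mod_cast hk1; exact_mod_cast Nat.lt_succ_of_le hk2]
    · have : ((k : Int)).toNat = k := by omega
      rw [this, hp, hd]
      exact pvAInner_complete m (v + 1)

-- ===== B-side lemmas =====

theorem pvBPeel_sound (s : List Char) (i : Nat) (cur : Int) (m : Nat)
    (hi : i ≤ s.length) (hm : 1 ≤ m) (hd : s.drop i = pvChain cur m)
    (ht : pvBPeel s (s.length / 2) i cur = true) : pvRoar s := by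
  rw [pvBPeel] at ht
  by_cases h0 : 0 < i
  · rw [if_pos h0] at ht
    by_cases h1 : i ≤ s.length / 2 ∧ PySem.Int.ofChars? (s.take i) = some (cur - 1)
    · refine ⟨i, cur - 1, m, h0, h1.1, hm, h1.2, ?_⟩
      rw [hd]; congr 1; ring
    · rw [if_neg h1] at ht
      by_cases h2 : PySem.Chars.endswith (s.take i) (PySem.Int.toChars (cur - 1)) = true
      · rw [if_pos h2] at ht
        obtain ⟨u, hu⟩ := (PySem.Chars.endswith_iff _ _).mp h2
        have hlp := pvToChars_len_pos (cur - 1)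
        have htl : (s.take i).length = i := by simp; omega
        have hul : u.length = i - (PySem.Int.toChars (cur - 1)).length := by
          have := congrArg List.length hu
          simp at this; omega
        have hlpi : (PySem.Int.toChars (cur - 1)).length ≤ i := by
          have := congrArg List.length hu
          simp at this; omega
        have hd' : s.drop (i - (PySem.Int.toChars (cur - 1)).length)
            = pvChain (cur - 1) (m + 1) := by
          have hsplit : s = u ++ (PySem.Int.toChars (cur - 1) ++ s.drop i) := by
            conv_lhs => rw [← List.take_append_drop i s]
            rw [← hu, List.append_assoc]
          rw [← hul, hsplit, List.drop_left]
          show _ = PySem.Int.toChars (cur - 1) ++ pvChain (cur - 1 + 1) m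
          rw [hd]; congr 2; ring
        exact pvBPeel_sound s (i - (PySem.Int.toChars (cur - 1)).length) (cur - 1) (m + 1)
          (by omega) (by omega) hd' ht
      · simp [h2] at ht
  · simp [h0] at ht
termination_by i
decreasing_by
  have h1 := pvToChars_len_pos (cur - 1)
  omega

theorem pvBPeel_complete (s : List Char) (k m : Nat) (v : Int)
    (hk1 : 1 ≤ k) (hkh : k ≤ s.length / 2)
    (hp : PySem.Int.ofChars? (s.take k) = some v)
    (hd : s.drop k = pvChain (v + 1) m)
    (j : Nat) (hj1 : 1 ≤ j) (hjm : j ≤ m) :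
    pvBPeel s (s.length / 2) (k + (pvChain (v + 1) (j - 1)).length) (v + j) = true := by
  have hkn : k ≤ s.length := le_trans hkh (Nat.div_le_self _ _)
  have htk : (s.take k).length = k := by simp; omega
  match j, hj1 with
  | 1, _ =>
    rw [pvBPeel]
    simp only [show (1 : Nat) - 1 = 0 from rfl, pvChain, List.length_nil, Nat.add_zero]
    rw [if_pos (by omega : 0 < k)]
    have : PySem.Int.ofChars? (s.take k) = some ((v + (1:Nat)) - 1) := by
      rw [hp]; congr 1; push_cast; ring
    rw [if_pos ⟨hkh, this⟩]
  | (jj + 2), _ =>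
    simp only [show jj + 2 - 1 = jj + 1 from rfl]
    have hjj : jj + 1 ≤ m - 1 := by omega
    have hsplitm : pvChain (v + 1) m
        = pvChain (v + 1) (jj + 1) ++ pvChain (v + 1 + (jj + 1 : Nat)) (m - (jj + 1)) := by
      rw [← pvChain_split (jj + 1) (v + 1) (m - (jj + 1))]
      congr 1; omega
    have hsnoc : pvChain (v + 1) (jj + 1)
        = pvChain (v + 1) jj ++ PySem.Int.toChars (v + 1 + jj) := pvChain_snoc _ _
    have hs : s = s.take k ++ pvChain (v + 1) m := by
      conv_lhs => rw [← List.take_append_drop k s]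
      rw [hd]
    have htake : s.take (k + (pvChain (v + 1) (jj + 1)).length)
        = s.take k ++ pvChain (v + 1) (jj + 1) := by
      conv_lhs => rw [hs, hsplitm, ← List.append_assoc]
      rw [show k + (pvChain (v + 1) (jj + 1)).length
          = (s.take k ++ pvChain (v + 1) (jj + 1)).length by simp [htk]]
      exact List.take_left
    rw [pvBPeel]
    rw [if_pos (by omega : 0 < k + (pvChain (v + 1) (jj + 1)).length)]
    have hcur : (v + (jj + 2 : Nat)) - 1 = v + 1 + (jj : Nat) := by push_cast; ring
    by_cases hc : k + (pvChain (v + 1) (jj + 1)).length ≤ s.length / 2 ∧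
        PySem.Int.ofChars? (s.take (k + (pvChain (v + 1) (jj + 1)).length))
          = some ((v + (jj + 2 : Nat)) - 1)
    · rw [if_pos hc]
    · rw [if_neg hc]
      have hend : PySem.Chars.endswith (s.take (k + (pvChain (v + 1) (jj + 1)).length))
          (PySem.Int.toChars ((v + (jj + 2 : Nat)) - 1)) = true := by
        rw [PySem.Chars.endswith_iff, hcur, htake, hsnoc, ← List.append_assoc]
        exact ⟨_, rfl⟩
      rw [if_pos hend]
      have harith : k + (pvChain (v + 1) (jj + 1)).length
          - (PySem.Int.toChars ((v + (jj + 2 : Nat)) - 1)).length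
          = k + (pvChain (v + 1) jj).length := by
        rw [hcur, hsnoc]; simp only [List.length_append]; omega
      rw [harith, hcur]
      have := pvBPeel_complete s k m v hk1 hkh hp hd (jj + 1) (by omega) (by omega)
      simpa [show (jj + 1) - 1 = jj from rfl, show v + 1 + (jj:Nat) = v + ((jj:Nat) + 1) by ring]
        using this
termination_by j

-- str(z) for 0 ≤ z is all digits; its digit-fold value is z
theorem pvToDigitsCore_acc (f n : Nat) (acc : List Char) (h : n < f) :
    Nat.toDigitsCore 10 f n acc = Nat.toDigitsCore 10 f n [] ++ acc := by
  induction f generalizing n acc with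
  | zero => omega
  | succ f ih =>
    simp only [Nat.toDigitsCore]
    split
    · simp
    · rename_i hq
      have hn0 : 0 < n := by
        rcases Nat.eq_zero_or_pos n with h0 | h0
        · exfalso; apply hq; rw [h0]
        · exact h0
      have hlt : n / 10 < f := by
        have : n / 10 < n := Nat.div_lt_self hn0 (by norm_num)
        omega
      rw [ih (n / 10) _ hlt, ih (n / 10) [Nat.digitChar (n % 10)] hlt]
      simp

theorem pvToDigitsCore_fuel (n : Nat) : ∀ (f f' : Nat), n < f → n < f' →
    Nat.toDigitsCore 10 f n [] = Nat.toDigitsCore 10 f' n [] := by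
  induction n using Nat.strong_induction_on with
  | _ n ih =>
    intro f f' hf hf'
    match f, f' with
    | g + 1, g' + 1 =>
      simp only [Nat.toDigitsCore]
      split
      · rfl
      · rename_i hq
        have hn0 : 0 < n := by
          rcases Nat.eq_zero_or_pos n with h0 | h0
          · exfalso; apply hq; rw [h0]
          · exact h0
        have hlt : n / 10 < n := Nat.div_lt_self hn0 (by norm_num)
        rw [pvToDigitsCore_acc g (n / 10) _ (by omega),
          pvToDigitsCore_acc g' (n / 10) _ (by omega),
          ih (n / 10) hlt g g' (by omega) (by omega)]

theorem pvToDigits_small (n : Nat) (h : n < 10) :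
    Nat.toDigits 10 n = [Nat.digitChar n] := by
  show Nat.toDigitsCore 10 (n + 1) n [] = _
  simp only [Nat.toDigitsCore]
  split
  · rw [Nat.mod_eq_of_lt h]
  · rename_i hq
    exact absurd (Nat.div_eq_of_lt h) hq

theorem pvToDigits_rec (n : Nat) (h : 10 ≤ n) :
    Nat.toDigits 10 n = Nat.toDigits 10 (n / 10) ++ [Nat.digitChar (n % 10)] := by
  show Nat.toDigitsCore 10 (n + 1) n [] = _
  simp only [Nat.toDigitsCore]
  split
  · rename_i hq
    exfalso; omega
  · have hlt : n / 10 < n := Nat.div_lt_self (by omega) (by norm_num)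
    rw [pvToDigitsCore_acc n (n / 10) _ (by omega)]
    congr 1
    exact pvToDigitsCore_fuel (n / 10) n (n / 10 + 1) (by omega) (by omega)

theorem pvDigitChar_val (d : Nat) (h : d < 10) :
    ((Nat.digitChar d).toNat : Int) - 48 = (d : Int) := by
  interval_cases d <;> decide

theorem pvDigitChar_isDigit (d : Nat) (h : d < 10) : (Nat.digitChar d).isDigit = true := by
  interval_cases d <;> decide

theorem pvToDigits_digits (n : Nat) : ∀ c ∈ Nat.toDigits 10 n, c.isDigit = true := by
  induction n using Nat.strong_induction_on with
  | _ n ih =>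
    intro c hc
    by_cases h : n < 10
    · rw [pvToDigits_small n h] at hc
      simp at hc
      rw [hc]; exact pvDigitChar_isDigit n h
    · rw [pvToDigits_rec n (by omega)] at hc
      rcases List.mem_append.mp hc with h1 | h1
      · exact ih (n / 10) (Nat.div_lt_self (by omega) (by norm_num)) c h1
      · simp at h1
        rw [h1]; exact pvDigitChar_isDigit _ (Nat.mod_lt _ (by norm_num))

theorem pvDigitVal_toDigits (n : Nat) : pvDigitVal (Nat.toDigits 10 n) = (n : Int) := by
  induction n using Nat.strong_induction_on with
  | _ n ih =>
    by_cases h : n < 10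
    · rw [pvToDigits_small n h]
      unfold pvDigitVal
      simp [pvDigitChar_val n h]
    · rw [pvToDigits_rec n (by omega)]
      unfold pvDigitVal
      rw [List.foldl_append]
      have := ih (n / 10) (Nat.div_lt_self (by omega) (by norm_num))
      unfold pvDigitVal at this
      rw [this]
      simp [pvDigitChar_val (n % 10) (Nat.mod_lt _ (by norm_num))]
      have h10 : ((n : Int)) = (n / 10 : Nat) * 10 + ((n % 10 : Nat) : Int) := by
        push_cast
        omega
      omega

theorem pvDigitVal_toChars (z : Int) (h : 0 ≤ z) :
    pvDigitVal (PySem.Int.toChars z) = z := by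
  unfold PySem.Int.toChars
  rw [if_neg (by omega)]
  rw [pvDigitVal_toDigits]
  omega

theorem pvToChars_digits (z : Int) (h : 0 ≤ z) :
    ∀ c ∈ PySem.Int.toChars z, c.isDigit = true := by
  unfold PySem.Int.toChars
  rw [if_neg (by omega)]
  exact pvToDigits_digits z.toNat

theorem pvB_iff (year : Int) (hy : 0 ≤ year) :
    isRugissant_alt year = true ↔ pvRoar (PySem.Int.toChars year) := by
  unfold isRugissant_alt
  rw [List.any_eq_true]
  set s := PySem.Int.toChars year with hs
  have hn : 0 < s.length := pvToChars_len_pos year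
  constructor
  · rintro ⟨k, hk, hbody⟩
    rw [PySem.List.mem_pyRange_one] at hk
    simp only at hbody
    by_cases hcan : PySem.Int.toChars (pvDigitVal (s.drop (s.length - k.toNat)))
        = s.drop (s.length - k.toNat)
    · rw [if_pos hcan] at hbody
      refine pvBPeel_sound s (s.length - k.toNat) (pvDigitVal (s.drop (s.length - k.toNat))) 1
        (by omega) (by omega) ?_ hbody
      show s.drop _ = PySem.Int.toChars _ ++ pvChain _ 0
      simp [pvChain, hcan]
    · rw [if_neg hcan] at hbody
      simp at hbody
  · rintro ⟨k, v, m, hk1, hk2, hm1, hp, hd⟩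
    have hkn : k ≤ s.length := le_trans hk2 (Nat.div_le_self _ _)
    have htk : (s.take k).length = k := by simp; omega
    -- v + 1 ≥ 0: otherwise str(v+1) starts with '-', but s is all digits
    have hv1 : 0 ≤ v + 1 := by
      by_contra hneg
      have hchain : pvChain (v + 1) m
          = PySem.Int.toChars (v + 1) ++ pvChain (v + 1 + 1) (m - 1) := by
        conv_lhs => rw [show m = (m - 1) + 1 by omega]
        rfl
      have hmem : '-' ∈ s.drop k := by
        rw [hd, hchain]
        have : PySem.Int.toChars (v + 1) = '-' :: Nat.toDigits 10 (v + 1).natAbs := by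
          unfold PySem.Int.toChars
          rw [if_pos (by omega)]
        rw [this]; simp
      have hdig := pvToChars_digits year hy '-' (List.mem_of_mem_drop hmem)
      simp at hdig
    have hL : 0 ≤ v + (m : Int) := by omega
    have hsnoc : pvChain (v + 1) m
        = pvChain (v + 1) (m - 1) ++ PySem.Int.toChars (v + (m : Int)) := by
      conv_lhs => rw [show m = (m - 1) + 1 by omega]
      rw [pvChain_snoc]
      congr 2
      have : ((m - 1 : Nat) : Int) = (m : Int) - 1 := by omega
      rw [this]; ring
    have hdroplen : (s.drop k).length = s.length - k := by simp
    have hlen : s.length - k = (pvChain (v + 1) (m - 1)).length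
        + (PySem.Int.toChars (v + (m : Int))).length := by
      rw [← hdroplen, hd, hsnoc]; simp
    set ko := (PySem.Int.toChars (v + (m : Int))).length with hko
    have hko1 : 1 ≤ ko := pvToChars_len_pos _
    have hkon : ko < s.length := by omega
    refine ⟨(ko : Int), ?_, ?_⟩
    · rw [PySem.List.mem_pyRange_one]
      constructor <;> [exact_mod_cast hko1; exact_mod_cast hkon]
    · have hkonat : ((ko : Int)).toNat = ko := by omega
      simp only [hkonat]
      set A := s.take k ++ pvChain (v + 1) (m - 1) with hAdef
      have hsfull : s = A ++ PySem.Int.toChars (v + (m : Int)) := by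
        rw [hAdef]
        conv_lhs => rw [← List.take_append_drop k s]
        rw [hd, hsnoc, List.append_assoc]
      have hprefixlen : A.length = s.length - ko := by
        rw [hAdef]; simp [htk]; omega
      have hdropko : s.drop (s.length - ko) = PySem.Int.toChars (v + (m : Int)) := by
        have h1 : s.drop (s.length - ko)
            = (A ++ PySem.Int.toChars (v + (m : Int))).drop A.length := by
          rw [hprefixlen, ← hsfull]
        rw [h1]
        exact List.drop_left
      show (if PySem.Int.toChars (pvDigitVal (s.drop (s.length - ko)))
            = s.drop (s.length - ko) then
          pvBPeel s (s.length / 2) (s.length - ko) (pvDigitVal (s.drop (s.length - ko)))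
        else false) = true
      rw [hdropko, pvDigitVal_toChars _ hL, if_pos rfl]
      rw [show s.length - ko = k + (pvChain (v + 1) (m - 1)).length from by omega]
      have := pvBPeel_complete s k m v hk1 hk2 hp hd m hm1 le_rfl
      exact this

-- ===== VERDICT (by name: the statement is the Claim_ definition above) =====
theorem isRugissant_spec : Claim_equal_isRugissant := by
  intro year _ hpre
  unfold Spec_isRugissant
  rw [Bool.eq_iff_iff]
  rw [pvA_iff year, pvB_iff year hpre]
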